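-- pv_equiv track=rewrite | github.com/codatta/symphony | symphony/tools/linear_graphql.py | _skip_block_string
-- ===== SOURCE A (Python) =====
-- def _skip_block_string(query: str, index: int) -> int:
--     while index < len(query):
--         if query.startswith('\\"""', index):
--             index += 4
--             continue
--         if query.startswith('"""', index):
--             return index + 3
--         index += 1
--     return len(query)
-- ===== SOURCE B (Python) =====
-- def _skip_block_string(query: str, index: int) -> int:
--     # Jump between '"""' candidates with str.find instead of scanning
--     # every character; a candidate preceded (at or after the scan start)
--     # by a backslash is an escaped \""" and the search resumes after it.
--     while True:
--         p = query.find('"""', index)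
--         if p == -1:
--             return len(query)
--         if p > index and query[p - 1] == '\\':
--             index = p + 3
--         else:
--             return p + 3
-- ===== Notes on version B (the rewrite author's own statement) =====
-- stated objective: faster
-- what changed: B jumps directly between '"""' occurrences with str.find (treating an occurrence preceded by a backslash at or after the scan start as escaped and resuming after it) instead of A's character-by-character scan that calls startswith twice at every position.
-- outside the precondition, e.g. on _skip_block_string('"""', -10): A returns -7, B returns 3; on _skip_block_string('x"""y', -3): A returns 4, B returns 5
import Mathlib
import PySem

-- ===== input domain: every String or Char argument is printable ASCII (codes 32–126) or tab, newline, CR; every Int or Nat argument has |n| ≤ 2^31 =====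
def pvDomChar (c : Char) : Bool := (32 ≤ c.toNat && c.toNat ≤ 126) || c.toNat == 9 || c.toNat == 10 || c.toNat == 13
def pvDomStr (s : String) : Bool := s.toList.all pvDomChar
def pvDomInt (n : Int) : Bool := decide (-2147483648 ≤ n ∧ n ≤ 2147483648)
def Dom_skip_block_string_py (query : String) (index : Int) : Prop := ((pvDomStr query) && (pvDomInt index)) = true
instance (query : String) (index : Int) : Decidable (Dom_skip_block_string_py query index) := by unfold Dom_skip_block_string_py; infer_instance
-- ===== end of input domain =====

-- B replaces A's per-character scan (two startswith probes at every position) with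
-- str.find jumps between '"""' candidates; proved equal for every non-negative index.


-- ===== PORT A =====
-- Python's s.startswith(pre, i): pre is a prefix of s[i:] (exact for the nonempty
-- prefixes A uses; the start bound is read with slice semantics, as in CPython).
def pvStartswithFrom (s : List Char) (pre : List Char) (i : Int) : Bool :=
  PySem.Chars.startswith (PySem.List.slice s (some i) none) pre

-- termination facts for the two loops, kept as named lemmas so the definitions carry
-- only small proof terms
theorem pvA_dec (len index step : Int) (h1 : index < len) (h2 : 0 < step) :
    (len - (index + step)).toNat < (len - index).toNat :=
  (Int.toNat_lt_toNat (sub_pos.mpr h1)).mpr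
    (sub_lt_sub_left (lt_add_of_pos_right index h2) len)

-- the Python while-loop; `index` increases, `len - index` bounds the remaining steps
def skipA_go (s : List Char) (index : Int) : Int :=
  if _h : index < (s.length : Int) then
    if pvStartswithFrom s ['\\', '"', '"', '"'] index then
      skipA_go s (index + 4)
    else if pvStartswithFrom s ['"', '"', '"'] index then
      index + 3
    else
      skipA_go s (index + 1)
  else
    (s.length : Int)
termination_by ((s.length : Int) - index).toNat
decreasing_by
  · exact pvA_dec _ index 4 _h (by norm_num)
  · exact pvA_dec _ index 1 _h (by norm_num)

def skip_block_string_py (query : String) (index : Int) : Int :=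
  skipA_go query.toList index

-- ===== PORT B =====
-- a found occurrence lies inside the string (used for termination of the find-jump loop)
theorem pvFindFrom_le (s sub : List Char) (i : Int)
    (h : PySem.Chars.findFrom s sub i none ≠ -1) :
    PySem.Chars.findFrom s sub i none ≤ (s.length : Int) := by
  unfold PySem.Chars.findFrom at h ⊢
  simp only [Int.toNat_natCast, List.take_length] at h ⊢
  set st : Int := if i < 0 then if i + (s.length : Int) < 0 then 0 else i + (s.length : Int) else i with hst
  have h0 : 0 ≤ st := by
    rw [hst]
    split_ifs with h1 h2
    · exact le_refl 0
    · exact not_lt.mp h2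
    · exact not_lt.mp h1
  clear_value st
  clear hst
  split_ifs at h ⊢ with h1 h2
  · exact absurd rfl h
  · exact absurd rfl h
  · have hr := PySem.Chars.find_le_length (List.drop st.toNat s) sub
    have hd : ((List.drop st.toNat s).length : Int) = (s.length : Int) - st := by
      rw [List.length_drop, Nat.cast_sub (Int.toNat_le.mpr (not_lt.mp h1)),
        Int.toNat_of_nonneg h0]
    calc st + PySem.Chars.find (List.drop st.toNat s) sub
        ≤ st + ((s.length : Int) - st) := add_le_add (le_refl st) (le_of_le_of_eq hr hd)
      _ = (s.length : Int) := add_sub_cancel st (s.length : Int)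

theorem pvB_dec (s : List Char) (index : Int)
    (hp : PySem.Chars.findFrom s ['"', '"', '"'] index none ≠ -1)
    (hgt : PySem.Chars.findFrom s ['"', '"', '"'] index none > index) :
    ((s.length : Int) + 3 - (PySem.Chars.findFrom s ['"', '"', '"'] index none + 3)).toNat <
      ((s.length : Int) + 3 - index).toNat := by
  have h1 := pvFindFrom_le s ['"', '"', '"'] index hp
  exact (Int.toNat_lt_toNat (sub_pos.mpr (lt_of_le_of_lt
      (le_of_lt (lt_of_lt_of_le hgt h1))
      (lt_add_of_pos_right _ (by norm_num : (0 : Int) < 3))))).mpr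
    (sub_lt_sub_left
      (lt_of_lt_of_le hgt (le_add_of_nonneg_right (by norm_num : (0 : Int) ≤ 3)))
      ((s.length : Int) + 3))

-- the Python `while True` find-jump loop of Source B
def skipB_go (s : List Char) (index : Int) : Int :=
  let p := PySem.Chars.findFrom s ['"', '"', '"'] index none
  if hp : p = -1 then
    (s.length : Int)
  else if p > index ∧ PySem.List.pyGet? s (p - 1) = some '\\' then
    -- query[p-1]: in range whenever this branch runs with 0 ≤ index (p > index ≥ 0)
    skipB_go s (p + 3)
  else
    p + 3
termination_by ((s.length : Int) + 3 - index).toNat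
decreasing_by
  rename_i hesc
  exact pvB_dec s index hp hesc.1

def skip_block_string_py_alt (query : String) (index : Int) : Int :=
  skipB_go query.toList index

-- ===== PRECONDITION & SPEC =====
-- Pre_ excludes negative index, on which CPython's startswith/find count the start
-- from the string's end: there A's counter is decoupled from the probed position and
-- it can even return a negative result (e.g. -7 on ('"""', -10)) — an accident of the
-- implementation no caller of this scanner uses (it is always called with 0 ≤ index).
def Pre_skip_block_string_py (query : String) (index : Int) : Prop := 0 ≤ index
instance (query : String) (index : Int) : Decidable (Pre_skip_block_string_py query index) := by
  unfold Pre_skip_block_string_py; infer_instance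

def pvWitness_skip_block_string_py : String × Int := ("a\\\"\"\"b\"\"\"c", 0)

def Spec_skip_block_string_py (query : String) (index : Int) (out : Int) : Prop := out = skip_block_string_py_alt query index
instance (query : String) (index : Int) (out : Int) : Decidable (Spec_skip_block_string_py query index out) := by unfold Spec_skip_block_string_py; infer_instance

-- ===== CLAIM (what is proved, stated in full; the proofs are below) =====
def Claim_equal_skip_block_string_py : Prop := ∀ (query : String) (index : Int), Dom_skip_block_string_py query index → Pre_skip_block_string_py query index → Spec_skip_block_string_py query index (skip_block_string_py query index)

-- ===== LEMMAS AND PROOFS =====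

-- A's startswith probe, for a non-negative start, is prefix-of-drop
theorem pvStarts_iff (s pre : List Char) (i : Int) (h : 0 ≤ i) :
    pvStartswithFrom s pre i = true ↔ pre <+: s.drop i.toNat := by
  unfold pvStartswithFrom
  rw [PySem.List.slice_from s h, PySem.Chars.startswith_iff]

-- an escaped delimiter at j: backslash at j, '"""' right after
theorem pvEsc_iff (s : List Char) (j : Nat) :
    (['\\', '"', '"', '"'] <+: s.drop j) ↔
      (s[j]? = some '\\' ∧ ['"', '"', '"'] <+: s.drop (j + 1)) := by
  by_cases hj : j < s.length
  · rw [List.drop_eq_getElem_cons hj, List.cons_prefix_cons, List.getElem?_eq_getElem hj]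
    simp [eq_comm]
  · rw [List.drop_eq_nil_of_le (by omega), List.getElem?_eq_none_iff.2 (by omega)]
    simp

-- a real delimiter at j starts with '"'
theorem pvQuote_at (s : List Char) (j : Nat) (h : ['"', '"', '"'] <+: s.drop j) :
    s[j]? = some '"' := by
  have hj : j < s.length := by
    by_contra hc
    rw [List.drop_eq_nil_of_le (by omega)] at h
    simp at h
  rw [List.drop_eq_getElem_cons hj, List.cons_prefix_cons] at h
  rw [List.getElem?_eq_getElem hj, h.1]

-- findFrom past the end finds nothing
theorem pvFindFrom_of_gt (s sub : List Char) (i : Int) (h : (s.length : Int) < i) :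
    PySem.Chars.findFrom s sub i none = -1 := by
  unfold PySem.Chars.findFrom
  simp only
  split_ifs with h1 h2 h3 <;> omega

-- A scans positions [i, t] that contain no '"""' without stopping
theorem skipA_walk (s : List Char) (d : Nat) (i t : Int) (h0 : 0 ≤ i)
    (hd : t = i + d) (ht : t ≤ (s.length : Int))
    (hno : ∀ j : Nat, i ≤ (j : Int) → (j : Int) ≤ t → ¬ (['"', '"', '"'] <+: s.drop j)) :
    skipA_go s i = skipA_go s t := by
  induction d generalizing i with
  | zero => rw [hd]; norm_num
  | succ d ih =>
    have hi : i < (s.length : Int) := by omega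
    rw [skipA_go]
    have hb1 : pvStartswithFrom s ['\\', '"', '"', '"'] i = false := by
      rw [Bool.eq_false_iff, Ne, pvStarts_iff s _ i h0, pvEsc_iff s i.toNat]
      rintro ⟨-, hq⟩
      exact hno (i.toNat + 1) (by omega) (by omega) hq
    have hb2 : pvStartswithFrom s ['"', '"', '"'] i = false := by
      rw [Bool.eq_false_iff, Ne, pvStarts_iff s _ i h0]
      exact hno i.toNat (by omega) (by omega)
    rw [dif_pos hi, if_neg (by simp [hb1]), if_neg (by simp [hb2])]
    exact ih (i + 1) (by omega) (by omega)
      (fun j hj1 hj2 => hno j (by omega) (by omega))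

-- with no '"""' at or after i, A scans to the end
theorem skipA_none (s : List Char) (d : Nat) (i : Int) (h0 : 0 ≤ i)
    (hd : (s.length : Int) ≤ i + d)
    (hno : ∀ j : Nat, i ≤ (j : Int) → ¬ (['"', '"', '"'] <+: s.drop j)) :
    skipA_go s i = (s.length : Int) := by
  induction d generalizing i with
  | zero => rw [skipA_go, dif_neg (by omega)]
  | succ d ih =>
    by_cases hi : i < (s.length : Int)
    · rw [skipA_go]
      have hb1 : pvStartswithFrom s ['\\', '"', '"', '"'] i = false := by
        rw [Bool.eq_false_iff, Ne, pvStarts_iff s _ i h0, pvEsc_iff s i.toNat]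
        rintro ⟨-, hq⟩
        exact hno (i.toNat + 1) (by omega) hq
      have hb2 : pvStartswithFrom s ['"', '"', '"'] i = false := by
        rw [Bool.eq_false_iff, Ne, pvStarts_iff s _ i h0]
        exact hno i.toNat (by omega)
      rw [dif_pos hi, if_neg (by simp [hb1]), if_neg (by simp [hb2])]
      exact ih (i + 1) (by omega) (by omega)
        (fun j hj1 => hno j (by omega))
    · rw [skipA_go, dif_neg hi]

-- Python indexing at a non-negative position
theorem pvGet_nonneg (xs : List Char) (i : Int) (h : 0 ≤ i) :
    PySem.List.pyGet? xs i = xs[i.toNat]? := by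
  simp only [PySem.List.pyGet?, PySem.List.pyIdx?, if_pos h]
  split_ifs with h2
  · simp
  · simp only [Option.bind]
    rw [eq_comm, List.getElem?_eq_none_iff]
    omega

theorem pv_main (s : List Char) (m : Nat) (index : Int) (h0 : 0 ≤ index)
    (hm : ((s.length : Int) + 3 - index).toNat ≤ m) :
    skipA_go s index = skipB_go s index := by
  induction m generalizing index with
  | zero =>
    -- index ≥ len + 3: A exits at once, B finds nothing
    rw [skipA_go, dif_neg (by omega), skipB_go,
      dif_pos (pvFindFrom_of_gt s _ index (by omega))]
  | succ m ih =>
    rw [skipB_go]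
    by_cases hp : PySem.Chars.findFrom s ['"', '"', '"'] index none = -1
    · -- no delimiter at or after index: both return len
      rw [dif_pos hp]
      apply skipA_none s ((s.length : Int) - index).toNat index h0 (by omega)
      intro j hj hpre
      by_cases hlen : index ≤ (s.length : Int)
      · have hidx : index = ((index.toNat : Nat) : Int) := by omega
        rw [hidx, PySem.Chars.findFrom_natCast_eq_neg_one_iff s _ index.toNat (by omega)] at hp
        apply hp
        rw [← PySem.Chars.isIn_iff_infix, ← PySem.Chars.exists_prefix_drop_iff_isIn]
        exact ⟨j - index.toNat, by rwa [List.drop_drop, Nat.add_sub_cancel' (by omega)]⟩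
      · rw [List.drop_eq_nil_of_le (by omega)] at hpre
        simp at hpre
    · rw [dif_neg hp]
      set p := PySem.Chars.findFrom s ['"', '"', '"'] index none with hpdef
      have hp3 := pvFindFrom_le s ['"', '"', '"'] index hp
      have hlen : index ≤ (s.length : Int) := by
        by_contra hc
        exact hp (pvFindFrom_of_gt s ['"', '"', '"'] index (by omega))
      have hidx : index = ((index.toNat : Nat) : Int) := by omega
      obtain ⟨hp1, hocc, hmin⟩ :=
        PySem.Chars.findFrom_natCast_spec s ['"', '"', '"'] index.toNat (by omega)
          (by rw [← hidx]; exact hp)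
      rw [← hidx] at hp1 hocc hmin
      have hlen3 : p.toNat + 3 ≤ s.length := by
        have h3 := hocc.length_le
        simp [List.length_drop] at h3
        omega
      have hq := pvQuote_at s p.toNat hocc
      by_cases hpi : p = index
      · -- delimiter right at the scan start: not escaped, both return p + 3
        rw [if_neg (by rw [hpi]; simp)]
        have hb1 : pvStartswithFrom s ['\\', '"', '"', '"'] index = false := by
          rw [Bool.eq_false_iff, Ne, pvStarts_iff s _ index h0,
            pvEsc_iff s index.toNat]
          rintro ⟨hc, -⟩
          rw [show index.toNat = p.toNat by omega, hq] at hc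
          simp at hc
        have hb2 : pvStartswithFrom s ['"', '"', '"'] index = true := by
          rw [pvStarts_iff s _ index h0, show index.toNat = p.toNat by omega]
          exact hocc
        rw [skipA_go, dif_pos (by omega), if_neg (by simp [hb1]), if_pos (by simp [hb2])]
        omega
      · -- delimiter strictly after the start: A walks to p - 1 first
        have hpgt : index < p := by omega
        rw [skipA_walk s (p - 1 - index).toNat index (p - 1) h0 (by omega) (by omega)
          (fun j hj1 hj2 => hmin j (by omega) (by omega))]
        have hsucc : (p - 1).toNat + 1 = p.toNat := by omega
        by_cases hback : s[(p - 1).toNat]? = some '\\'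
        · -- escaped: A consumes \""" (4 chars), B resumes after the candidate
          have hb1 : pvStartswithFrom s ['\\', '"', '"', '"'] (p - 1) = true := by
            rw [pvStarts_iff s _ (p - 1) (by omega), pvEsc_iff s (p - 1).toNat, hsucc]
            exact ⟨hback, hocc⟩
          rw [skipA_go, dif_pos (by omega), if_pos (by simp [hb1]),
            show p - 1 + 4 = p + 3 by ring]
          rw [if_pos ⟨hpgt, by
            rw [pvGet_nonneg s (p - 1) (by omega)]; exact hback⟩]
          exact ih (p + 3) (by omega) (by omega)
        · -- real close: A steps over p - 1, matches '"""' at p; B is not escaped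
          have hb1 : pvStartswithFrom s ['\\', '"', '"', '"'] (p - 1) = false := by
            rw [Bool.eq_false_iff, Ne, pvStarts_iff s _ (p - 1) (by omega),
              pvEsc_iff s (p - 1).toNat]
            rintro ⟨hc, -⟩
            exact hback hc
          have hb2 : pvStartswithFrom s ['"', '"', '"'] (p - 1) = false := by
            rw [Bool.eq_false_iff, Ne, pvStarts_iff s _ (p - 1) (by omega)]
            exact hmin (p - 1).toNat (by omega) (by omega)
          have hc1 : pvStartswithFrom s ['\\', '"', '"', '"'] p = false := by
            rw [Bool.eq_false_iff, Ne, pvStarts_iff s _ p (by omega),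
              pvEsc_iff s p.toNat]
            rintro ⟨hc, -⟩
            rw [hq] at hc
            simp at hc
          have hc2 : pvStartswithFrom s ['"', '"', '"'] p = true := by
            rw [pvStarts_iff s _ p (by omega)]
            exact hocc
          rw [skipA_go, dif_pos (by omega), if_neg (by simp [hb1]), if_neg (by simp [hb2]),
            show p - 1 + 1 = p by ring]
          rw [skipA_go, dif_pos (by omega), if_neg (by simp [hc1]), if_pos (by simp [hc2])]
          rw [if_neg ?_]
          rintro ⟨-, hg⟩
          rw [pvGet_nonneg s (p - 1) (by omega)] at hg
          exact hback hg

-- ===== VERDICT (by name: the statement is the Claim_ definition above) =====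
theorem skip_block_string_py_spec : Claim_equal_skip_block_string_py := by
  intro q i _ hpre
  unfold Spec_skip_block_string_py skip_block_string_py skip_block_string_py_alt
  exact pv_main q.toList ((q.toList.length : Int) + 3 - i).toNat i hpre le_rfl
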